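-- pv_equiv track=rewrite | github.com/rmnldwg/lymph | lymph/types.py | create_alias_map
-- ===== SOURCE A (Python) =====
-- from collections.abc import Iterable, Mapping, Sequence
--
-- def does_contain_in_order(sequence: Sequence, items: Sequence) -> bool:
--     """Check if ``sequence`` contains ``items`` in the same order (gaps allowed).
--
--     >>> does_contain_in_order(["ipsi", "TtoII", "spread"], ["ipsi", "spread"])
--     True
--     >>> does_contain_in_order(["ipsi", "TtoII", "spread"], ["spread", "ipsi"])
--     False
--     """
--     if not items:
--         return True
--
--     if not sequence:
--         return False
--
--     if sequence[0] == items[0]: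
--         return does_contain_in_order(sequence[1:], items[1:])
--
--     return does_contain_in_order(sequence[1:], items)
--
-- def create_alias_map(
--     all_params: Iterable[str],
--     named_params: Iterable[str],
-- ) -> dict[str, list[str]]:
--     """Create a mapping from named params to valid param names.
--
--     >>> all_params = ["TtoII_spread", "TtoIII_spread", "IItoIII_spread", "late_p"]
--     >>> named_params = ["spread", "TtoIII_spread"]
--     >>> create_alias_map(all_params, named_params)   # doctest: +NORMALIZE_WHITESPACE
--     {'spread': ['TtoII_spread', 'TtoIII_spread', 'IItoIII_spread'],
--      'TtoIII_spread': ['TtoIII_spread']}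
--     """
--     param_aliases = {}
--
--     for named_param in named_params:
--         param_aliases[named_param] = []
--         for param in all_params:
--             if does_contain_in_order(
--                 sequence=param.split("_"),
--                 items=named_param.split("_"),
--             ):
--                 param_aliases[named_param].append(param)
--
--     return param_aliases
-- ===== SOURCE B (Python) =====
-- def create_alias_map(all_params, named_params):
--     def contains_in_order(sequence, items):
--         it = iter(sequence)
--         return all(item in it for item in items)
--
--     return {
--         named_param: [
--             param
--             for param in all_params
--             if contains_in_order(param.split("_"), named_param.split("_"))
--         ]
--         for named_param in named_params
--     }
-- ===== Notes on version B (the rewrite author's own statement) =====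
-- stated objective: idiomatic
-- what changed: The recursive subsequence test is replaced by an iterative single-forward-iterator test (all(item in it ...)), and the dict built by insert-then-repeated-append becomes a dict comprehension over a filter.
import Mathlib
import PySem

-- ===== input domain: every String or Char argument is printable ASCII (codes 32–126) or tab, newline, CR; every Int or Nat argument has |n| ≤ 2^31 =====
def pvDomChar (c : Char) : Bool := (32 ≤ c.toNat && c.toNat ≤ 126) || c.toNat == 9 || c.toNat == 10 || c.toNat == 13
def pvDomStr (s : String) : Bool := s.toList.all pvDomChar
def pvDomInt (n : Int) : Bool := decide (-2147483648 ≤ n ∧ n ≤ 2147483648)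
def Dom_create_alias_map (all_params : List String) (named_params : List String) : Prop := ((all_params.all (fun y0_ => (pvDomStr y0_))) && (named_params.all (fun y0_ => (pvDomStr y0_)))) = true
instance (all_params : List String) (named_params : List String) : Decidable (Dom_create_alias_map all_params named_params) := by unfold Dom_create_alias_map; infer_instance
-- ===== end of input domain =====

-- B replaces A's recursive subsequence test with an iterative forward-consuming
-- one and builds the dict by comprehension over a filter (objective: idiomatic).

-- s.split("_"): sep is nonempty, so split? always returns some (exact)
def pySplitUnderscore (s : String) : List String := (PySem.Str.split? s "_").getD []

-- ===== PORT A =====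
-- A's recursive does_contain_in_order: branch order as in Python.
def does_contain_in_order (sequence : List String) (items : List String) : Bool :=
  match items, sequence with
  | [], _ => true
  | _, [] => false
  | i :: its, s :: ss =>
    if s == i then does_contain_in_order ss its
    else does_contain_in_order ss (i :: its)

def create_alias_map (all_params : List String) (named_params : List String) : List (String × List String) :=
  (named_params.foldl (fun d named_param =>
      all_params.foldl (fun d param =>
          if does_contain_in_order (pySplitUnderscore param) (pySplitUnderscore named_param)
          then d.modify named_param [] (· ++ [param])   -- param_aliases[named_param].append(param)
          else d)
        (d.insert named_param []))                      -- param_aliases[named_param] = []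
    PySem.Dict.empty).items

-- ===== PORT B =====
-- `item in it`: consume the iterator until an element equal to `item` is found.
def consumeTo : List String → String → Option (List String)
  | [], _ => none
  | s :: ss, i => if s == i then some ss else consumeTo ss i

-- all(item in it for item in items) over it = iter(sequence)
def contains_in_order (sequence : List String) (items : List String) : Bool :=
  match items with
  | [] => true
  | i :: its =>
    match consumeTo sequence i with
    | none => false
    | some rest => contains_in_order rest its

def create_alias_map_alt (all_params : List String) (named_params : List String) : List (String × List String) :=
  (named_params.foldl (fun d named_param =>
      d.insert named_param
        (all_params.filter (fun param =>
          contains_in_order (pySplitUnderscore param) (pySplitUnderscore named_param))))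
    PySem.Dict.empty).items

-- ===== PRECONDITION & SPEC =====
def Spec_create_alias_map (all_params : List String) (named_params : List String) (out : List (String × List String)) : Prop := out = create_alias_map_alt all_params named_params
instance (all_params : List String) (named_params : List String) (out : List (String × List String)) : Decidable (Spec_create_alias_map all_params named_params out) := by unfold Spec_create_alias_map; infer_instance

-- ===== CLAIM (what is proved, stated in full; the proofs are below) =====
def Claim_equal_create_alias_map : Prop := ∀ (all_params : List String) (named_params : List String), Dom_create_alias_map all_params named_params → Spec_create_alias_map all_params named_params (create_alias_map all_params named_params)

-- ===== LEMMAS AND PROOFS =====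

-- the recursive and the iterator-consuming subsequence tests agree
theorem subseq_eq (sequence items : List String) :
    does_contain_in_order sequence items = contains_in_order sequence items := by
  induction sequence generalizing items with
  | nil => cases items <;> simp [does_contain_in_order, contains_in_order, consumeTo]
  | cons s ss ih =>
    cases items with
    | nil => simp [does_contain_in_order, contains_in_order]
    | cons i its =>
      by_cases h : s = i
      · simp [does_contain_in_order, contains_in_order, consumeTo, h, ih]
      · simpa [does_contain_in_order, contains_in_order, consumeTo, h] using ih (i :: its)

-- A's inner loop (insert [] then conditional appends) is one insert of the filter
theorem inner_loop_eq (c : String → Bool) (np : String) :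
    ∀ (l : List String) (d : PySem.Dict String (List String)) (L : List String),
      l.foldl (fun d p => if c p then d.modify np [] (· ++ [p]) else d) (d.insert np L)
        = d.insert np (L ++ l.filter c) := by
  intro l
  induction l with
  | nil => intro d L; simp
  | cons p l ih =>
    intro d L
    by_cases h : c p
    · have hm : (d.insert np L).modify np [] (· ++ [p]) = d.insert np (L ++ [p]) := by
        simp [PySem.Dict.modify, PySem.Dict.insert_insert_self, PySem.Dict.getD_insert_self]
      simp [List.foldl_cons, h, hm, ih]
    · simp [List.foldl_cons, h, ih]

-- the two outer folds agree from any starting dict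
theorem outer_loop_eq (all_params : List String) :
    ∀ (nps : List String) (d : PySem.Dict String (List String)),
      nps.foldl (fun d np =>
          all_params.foldl (fun d p =>
              if does_contain_in_order (pySplitUnderscore p) (pySplitUnderscore np)
              then d.modify np [] (· ++ [p]) else d)
            (d.insert np [])) d
        = nps.foldl (fun d np =>
            d.insert np (all_params.filter (fun p =>
              contains_in_order (pySplitUnderscore p) (pySplitUnderscore np)))) d := by
  intro nps
  induction nps with
  | nil => intro d; rfl
  | cons np nps ih =>
    intro d
    simp only [List.foldl_cons]
    rw [inner_loop_eq, ih]
    simp [funext fun p => subseq_eq (pySplitUnderscore p) (pySplitUnderscore np)]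

-- ===== VERDICT (by name: the statement is the Claim_ definition above) =====
theorem create_alias_map_spec : Claim_equal_create_alias_map := by
  intro all_params named_params _
  unfold Spec_create_alias_map create_alias_map create_alias_map_alt
  rw [outer_loop_eq]
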